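-- pv_equiv track=rewrite | github.com/polsebas/Herramienta_de_Diagnostico_Consulta_Con_IA | app/subagents/analysis.py | _identify_missing_dependencies
-- ===== SOURCE A (Python) =====
-- from typing import List, Dict, Any, Optional
--
-- def _identify_missing_dependencies(chunks: List[Dict[str, Any]]) -> List[str]:
--     """
--     Identifica dependencias que podrían estar faltando.
--
--     Args:
--         chunks: Lista de chunks
--
--     Returns:
--         Lista de dependencias faltantes
--     """
--     # Implementación simple - en producción usar análisis de dependencias
--     dependencies = []
--
--     for chunk in chunks:
--         text = chunk.get("text", "")
--
--         # Buscar referencias a otros documentos o secciones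
--         if "ver" in text.lower() or "referencia" in text.lower():
--             dependencies.append("referencias_cruzadas")
--         if "requisito" in text.lower() or "dependencia" in text.lower():
--             dependencies.append("requisitos_previos")
--
--     return list(set(dependencies))
-- ===== SOURCE B (Python) =====
-- from typing import List, Dict, Any
--
-- def _identify_missing_dependencies(chunks: List[Dict[str, Any]]) -> List[str]:
--     """Two independent short-circuiting existence checks instead of one accumulating loop + set dedup."""
--     texts = [chunk.get("text", "").lower() for chunk in chunks]
--     tags = []
--     if any("ver" in t or "referencia" in t for t in texts):
--         tags.append("referencias_cruzadas")
--     if any("requisito" in t or "dependencia" in t for t in texts):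
--         tags.append("requisitos_previos")
--     return tags
-- ===== Notes on version B (the rewrite author's own statement) =====
-- stated objective: simpler
-- what changed: Replaces A's accumulating per-chunk loop plus list(set(...)) dedup with two independent short-circuiting any() existence checks that each append their tag at most once, so no duplicate list and no set are ever built.
import Mathlib
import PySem

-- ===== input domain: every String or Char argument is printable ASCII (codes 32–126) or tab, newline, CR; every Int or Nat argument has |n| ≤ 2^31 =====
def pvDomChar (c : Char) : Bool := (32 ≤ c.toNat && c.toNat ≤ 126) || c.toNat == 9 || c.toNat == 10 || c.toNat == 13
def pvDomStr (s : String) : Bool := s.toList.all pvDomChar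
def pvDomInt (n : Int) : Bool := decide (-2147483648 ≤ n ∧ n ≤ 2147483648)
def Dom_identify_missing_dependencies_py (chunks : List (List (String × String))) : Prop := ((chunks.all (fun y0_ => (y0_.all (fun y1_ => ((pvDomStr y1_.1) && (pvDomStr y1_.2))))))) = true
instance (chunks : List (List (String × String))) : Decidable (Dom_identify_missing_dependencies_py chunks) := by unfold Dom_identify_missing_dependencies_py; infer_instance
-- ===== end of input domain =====

-- B replaces A's accumulating loop + list(set(...)) dedup by two independent existence checks (objective: simpler).


-- ===== PORT A =====
def identify_missing_dependencies_py (chunks : List (List (String × String))) : List String :=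
  let dependencies : List String :=
    chunks.foldl (fun dependencies chunk =>
      let text := (PySem.Dict.mk chunk).getD "text" ""
      let dependencies :=
        if PySem.Str.isIn "ver" (PySem.Str.lower text) || PySem.Str.isIn "referencia" (PySem.Str.lower text) then
          dependencies ++ ["referencias_cruzadas"]
        else dependencies
      if PySem.Str.isIn "requisito" (PySem.Str.lower text) || PySem.Str.isIn "dependencia" (PySem.Str.lower text) then
        dependencies ++ ["requisitos_previos"]
      else dependencies) []
  PySem.Set.ofList dependencies

-- ===== PORT B =====
def identify_missing_dependencies_py_alt (chunks : List (List (String × String))) : List String :=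
  let texts := chunks.map (fun chunk => PySem.Str.lower ((PySem.Dict.mk chunk).getD "text" ""))
  let tags : List String :=
    if texts.any (fun t => PySem.Str.isIn "ver" t || PySem.Str.isIn "referencia" t) then
      ["referencias_cruzadas"]
    else []
  if texts.any (fun t => PySem.Str.isIn "requisito" t || PySem.Str.isIn "dependencia" t) then
    tags ++ ["requisitos_previos"]
  else tags

-- ===== PRECONDITION & SPEC =====
-- helpers for Pre_ (closed-form: does any chunk text match keyword group 1 / group 2?)
def pvText_identify (chunk : List (String × String)) : String :=
  PySem.Str.lower ((PySem.Dict.mk chunk).getD "text" "")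
def pvGrp1 (chunk : List (String × String)) : Bool :=
  PySem.Str.isIn "ver" (pvText_identify chunk) || PySem.Str.isIn "referencia" (pvText_identify chunk)
def pvGrp2 (chunk : List (String × String)) : Bool :=
  PySem.Str.isIn "requisito" (pvText_identify chunk) || PySem.Str.isIn "dependencia" (pvText_identify chunk)

-- Pre_ excludes inputs on which BOTH keyword groups match somewhere: there A returns list(set(...)) of two elements,
-- whose order is an accident of the interpreter's hash seed, so neither order is the specified one; B returns a fixed order.
def Pre_identify_missing_dependencies_py (chunks : List (List (String × String))) : Prop :=
  ¬ ((chunks.any pvGrp1) = true ∧ (chunks.any pvGrp2) = true)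
instance (chunks : List (List (String × String))) : Decidable (Pre_identify_missing_dependencies_py chunks) := by
  unfold Pre_identify_missing_dependencies_py; infer_instance

def pvWitness_identify_missing_dependencies_py : (List (List (String × String))) := [[("text", "ver seccion 2")]]

def Spec_identify_missing_dependencies_py (chunks : List (List (String × String))) (out : List String) : Prop := out = identify_missing_dependencies_py_alt chunks
instance (chunks : List (List (String × String))) (out : List String) : Decidable (Spec_identify_missing_dependencies_py chunks out) := by unfold Spec_identify_missing_dependencies_py; infer_instance

-- ===== CLAIM (what is proved, stated in full; the proofs are below) =====
def Claim_equal_identify_missing_dependencies_py : Prop := ∀ (chunks : List (List (String × String))), Dom_identify_missing_dependencies_py chunks → Pre_identify_missing_dependencies_py chunks → Spec_identify_missing_dependencies_py chunks (identify_missing_dependencies_py chunks)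

-- ===== LEMMAS AND PROOFS =====

-- A's loop, unrolled: the accumulator is only ever appended to, so the fold is acc ++ a flatMap of per-chunk tags.
def pvStep (chunk : List (String × String)) : List String :=
  (if pvGrp1 chunk then ["referencias_cruzadas"] else []) ++ (if pvGrp2 chunk then ["requisitos_previos"] else [])

theorem pvFoldA_eq (chunks : List (List (String × String))) (acc : List String) :
    chunks.foldl (fun dependencies chunk =>
      let text := (PySem.Dict.mk chunk).getD "text" ""
      let dependencies :=
        if PySem.Str.isIn "ver" (PySem.Str.lower text) || PySem.Str.isIn "referencia" (PySem.Str.lower text) then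
          dependencies ++ ["referencias_cruzadas"]
        else dependencies
      if PySem.Str.isIn "requisito" (PySem.Str.lower text) || PySem.Str.isIn "dependencia" (PySem.Str.lower text) then
        dependencies ++ ["requisitos_previos"]
      else dependencies) acc = acc ++ chunks.flatMap pvStep := by
  induction chunks generalizing acc with
  | nil => simp
  | cons c t ih =>
    simp only [List.foldl_cons, List.flatMap_cons, ih]
    unfold pvStep pvGrp1 pvGrp2 pvText_identify
    split_ifs <;> simp

-- set(xs) of a nonempty list whose elements are all a is [a]
theorem pvFoldlAdd_absorb {α : Type} [BEq α] (a : α) (t : List α) (s : List α)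
    (hall : ∀ x ∈ t, x = a) (hc : PySem.Set.contains s a = true) :
    t.foldl PySem.Set.add s = s := by
  induction t generalizing s with
  | nil => rfl
  | cons x t ih =>
    have hx := hall x (by simp); subst hx
    simp only [List.foldl_cons, PySem.Set.add, hc, if_pos]
    exact ih s (fun y hy => hall y (by simp [hy])) hc

theorem pvOfList_const {α : Type} [BEq α] [LawfulBEq α] (a : α) (l : List α)
    (hne : l ≠ []) (hall : ∀ x ∈ l, x = a) : PySem.Set.ofList l = [a] := by
  cases l with
  | nil => exact absurd rfl hne
  | cons x t =>
    have hx := hall x (by simp); subst hx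
    rw [PySem.Set.ofList_eq_foldl, List.foldl_cons]
    have h1 : PySem.Set.add ([] : List α) x = [x] := by
      simp [PySem.Set.add, PySem.Set.contains]
    rw [h1]
    exact pvFoldlAdd_absorb x t [x] (fun y hy => hall y (by simp [hy]))
      (by simp [PySem.Set.contains])

theorem pvOfList_flat_if {α : Type} (p : α → Bool) (a : String) (l : List α) :
    PySem.Set.ofList (l.flatMap (fun c => if p c then [a] else [])) =
      (if l.any p then [a] else []) := by
  rcases h : l.any p with _ | _
  · have : l.flatMap (fun c => if p c then [a] else []) = [] := by
      simp only [List.flatMap_eq_nil_iff]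
      intro c hc
      simp [List.any_eq_false.mp h c hc]
    simp [this]
  · apply pvOfList_const
    · obtain ⟨c, hc, hp⟩ := List.any_eq_true.mp h
      intro hnil
      have := List.flatMap_eq_nil_iff.mp hnil c hc
      simp [hp] at this
    · intro x hx
      obtain ⟨c, hc, hxc⟩ := List.mem_flatMap.mp hx
      by_cases hp : p c = true <;> simp [hp] at hxc
      exact hxc

-- ===== VERDICT (by name: the statement is the Claim_ definition above) =====
theorem identify_missing_dependencies_py_spec : Claim_equal_identify_missing_dependencies_py := by
  intro chunks _ hpre
  unfold Spec_identify_missing_dependencies_py identify_missing_dependencies_py identify_missing_dependencies_py_alt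
  rw [pvFoldA_eq, List.nil_append]
  simp only [List.any_map, Function.comp_def]
  have hg1 : (chunks.any fun c => PySem.Str.isIn "ver" (PySem.Str.lower ((PySem.Dict.mk c).getD "text" "")) || PySem.Str.isIn "referencia" (PySem.Str.lower ((PySem.Dict.mk c).getD "text" ""))) = chunks.any pvGrp1 := by
    unfold pvGrp1 pvText_identify; rfl
  have hg2 : (chunks.any fun c => PySem.Str.isIn "requisito" (PySem.Str.lower ((PySem.Dict.mk c).getD "text" "")) || PySem.Str.isIn "dependencia" (PySem.Str.lower ((PySem.Dict.mk c).getD "text" ""))) = chunks.any pvGrp2 := by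
    unfold pvGrp2 pvText_identify; rfl
  rw [hg1, hg2]
  unfold Pre_identify_missing_dependencies_py at hpre
  cases h2 : chunks.any pvGrp2 with
  | false =>
    have hstep : chunks.flatMap pvStep
        = chunks.flatMap (fun c => if pvGrp1 c then ["referencias_cruzadas"] else []) := by
      rw [List.flatMap_def, List.flatMap_def]
      congr 1
      apply List.map_congr_left
      intro c hc
      unfold pvStep
      rw [Bool.eq_false_iff.mpr (List.any_eq_false.mp h2 c hc)]
      simp
    rw [hstep, pvOfList_flat_if]
    cases h1 : chunks.any pvGrp1 <;> simp
  | true =>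
    have h1 : chunks.any pvGrp1 = false := by
      cases h1 : chunks.any pvGrp1
      · rfl
      · exact absurd ⟨h1, h2⟩ hpre
    have hstep : chunks.flatMap pvStep
        = chunks.flatMap (fun c => if pvGrp2 c then ["requisitos_previos"] else []) := by
      rw [List.flatMap_def, List.flatMap_def]
      congr 1
      apply List.map_congr_left
      intro c hc
      unfold pvStep
      rw [Bool.eq_false_iff.mpr (List.any_eq_false.mp h1 c hc)]
      simp
    rw [hstep, pvOfList_flat_if, h1, h2]
    simp
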